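-- pv_equiv track=rewrite | github.com/kirbs-btw/compile_set_5_assembly | compile_a.py | splitLine
-- ===== SOURCE A (Python) =====
-- def splitLine(line):
--     lineNum = ""
--     command = ""
--     pointer = ""
--
--     counter = 0
--     for i in line:
--         if i == " ":
--             counter += 1
--         elif counter == 0:
--             lineNum += str(i)
--         elif counter == 1:
--             command += str(i)
--         elif counter == 2:
--             pointer += str(i)
--
--     return lineNum, command, pointer
-- ===== SOURCE B (Python) =====
-- def splitLine(line):
--     parts = line.split(" ")
--     lineNum = parts[0] if len(parts) > 0 else ""
--     command = parts[1] if len(parts) > 1 else ""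
--     pointer = parts[2] if len(parts) > 2 else ""
--     return lineNum, command, pointer
-- ===== Notes on version B (the rewrite author's own statement) =====
-- stated objective: simpler
-- what changed: Replaced the per-character space-counting state machine with a single split on the space separator followed by indexing the first three segments (empty string when a segment is missing).
import Mathlib
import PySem

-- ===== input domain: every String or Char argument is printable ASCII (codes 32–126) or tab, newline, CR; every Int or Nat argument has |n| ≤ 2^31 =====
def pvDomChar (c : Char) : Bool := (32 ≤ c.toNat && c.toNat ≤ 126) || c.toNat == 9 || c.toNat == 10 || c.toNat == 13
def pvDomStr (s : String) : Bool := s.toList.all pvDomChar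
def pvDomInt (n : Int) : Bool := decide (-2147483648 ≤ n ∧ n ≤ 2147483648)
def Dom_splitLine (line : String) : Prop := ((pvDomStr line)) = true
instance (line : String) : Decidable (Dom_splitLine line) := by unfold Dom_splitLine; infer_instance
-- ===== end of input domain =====

-- B replaces A's per-character space-counting state machine by split-on-space then indexing the
-- first three segments (objective: simpler).

-- ===== PORT A =====
def splitLineStep (s : String × String × String × Nat) (i : Char) : String × String × String × Nat :=
  let (lineNum, command, pointer, counter) := s
  if i = ' ' then (lineNum, command, pointer, counter + 1)
  else if counter = 0 then (lineNum.push i, command, pointer, counter)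
  else if counter = 1 then (lineNum, command.push i, pointer, counter)
  else if counter = 2 then (lineNum, command, pointer.push i, counter)
  else s

def splitLine (line : String) : String × String × String :=
  let r := line.toList.foldl splitLineStep ("", "", "", 0)
  (r.1, r.2.1, r.2.2.1)

-- ===== PORT B =====
def splitLine_alt (line : String) : String × String × String :=
  let parts := (PySem.Chars.splitOn line.toList [' ']).map String.ofList
  (if 0 < parts.length then parts.getD 0 "" else "",
   if 1 < parts.length then parts.getD 1 "" else "",
   if 2 < parts.length then parts.getD 2 "" else "")

-- ===== PRECONDITION & SPEC =====
def Spec_splitLine (line : String) (out : String × String × String) : Prop := out = splitLine_alt line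
instance (line : String) (out : String × String × String) : Decidable (Spec_splitLine line out) := by unfold Spec_splitLine; infer_instance

-- ===== CLAIM (what is proved, stated in full; the proofs are below) =====
def Claim_equal_splitLine : Prop := ∀ (line : String), Dom_splitLine line → Spec_splitLine line (splitLine line)

-- ===== LEMMAS AND PROOFS =====

/-- Structural single-space split (spec for `PySem.Chars.splitOn · [' ']`). -/
def split1 : List Char → List (List Char)
  | [] => [[]]
  | c :: cs =>
    if c = ' ' then [] :: split1 cs
    else
      match split1 cs with
      | [] => [[c]]
      | x :: xs => (c :: x) :: xs

theorem split1_ne_nil (cs : List Char) : split1 cs ≠ [] := by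
  cases cs with
  | nil => simp [split1]
  | cons c cs =>
    simp only [split1]
    split
    · simp
    · cases h : split1 cs <;> simp

theorem go_eq_split1 : ∀ (fuel : Nat) (l cur : List Char) (acc : List (List Char)),
    l.length < fuel →
    PySem.Chars.splitOn.go [' '] fuel l cur acc =
      acc.reverse ++ (match split1 l with
        | [] => []
        | x :: xs => (cur.reverse ++ x) :: xs) := by
  intro fuel
  induction fuel with
  | zero => intro l cur acc h; omega
  | succ f ih =>
    intro l cur acc h
    cases l with
    | nil => simp [PySem.Chars.splitOn.go, split1]
    | cons c rest =>
      by_cases hc : c = ' '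
      · subst hc
        have : PySem.Chars.splitOn.go [' '] (f+1) (' ' :: rest) cur acc =
            PySem.Chars.splitOn.go [' '] f rest [] (cur.reverse :: acc) := by
          simp [PySem.Chars.splitOn.go, List.isPrefixOf]
        rw [this, ih rest [] (cur.reverse :: acc) (by simpa using Nat.lt_of_succ_lt_succ h)]
        obtain ⟨x, xs, hx⟩ : ∃ x xs, split1 rest = x :: xs := by
          cases hq : split1 rest with
          | nil => exact absurd hq (split1_ne_nil rest)
          | cons x xs => exact ⟨x, xs, rfl⟩
        simp [split1, hx]
      · have : PySem.Chars.splitOn.go [' '] (f+1) (c :: rest) cur acc =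
            PySem.Chars.splitOn.go [' '] f rest (c :: cur) acc := by
          simp [PySem.Chars.splitOn.go, List.isPrefixOf, show (' ' == c) = false by simp [Ne.symm hc]]
        rw [this, ih rest (c :: cur) acc (by simpa using Nat.lt_of_succ_lt_succ h)]
        obtain ⟨x, xs, hx⟩ : ∃ x xs, split1 rest = x :: xs := by
          cases hq : split1 rest with
          | nil => exact absurd hq (split1_ne_nil rest)
          | cons x xs => exact ⟨x, xs, rfl⟩
        simp [split1, hx, hc]

theorem splitOn_eq_split1 (cs : List Char) : PySem.Chars.splitOn cs [' '] = split1 cs := by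
  have h := go_eq_split1 (cs.length + 1) cs [] [] (by omega)
  rw [PySem.Chars.splitOn] at *
  rw [h]
  obtain ⟨x, xs, hx⟩ : ∃ x xs, split1 cs = x :: xs := by
    cases hq : split1 cs with
    | nil => exact absurd hq (split1_ne_nil cs)
    | cons x xs => exact ⟨x, xs, rfl⟩
  simp [hx]

/-- Stage ≥ 3: nothing is appended any more. -/
theorem foldl_stage3 (cs : List Char) : ∀ (a b c : String) (n : Nat), 3 ≤ n →
    ((cs.foldl splitLineStep (a, b, c, n)).1,
     (cs.foldl splitLineStep (a, b, c, n)).2.1,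
     (cs.foldl splitLineStep (a, b, c, n)).2.2.1) = (a, b, c) := by
  induction cs with
  | nil => intro a b c n hn; simp
  | cons ch cs ih =>
    intro a b c n hn
    by_cases h : ch = ' '
    · simpa [splitLineStep, h] using ih a b c (n + 1) (by omega)
    · have h0 : n ≠ 0 := by omega
      have h1 : n ≠ 1 := by omega
      have h2 : n ≠ 2 := by omega
      simpa [splitLineStep, h, h0, h1, h2] using ih a b c n hn

theorem foldl_stage2 (cs : List Char) : ∀ (a b c : String),
    ((cs.foldl splitLineStep (a, b, c, 2)).1,
     (cs.foldl splitLineStep (a, b, c, 2)).2.1,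
     (cs.foldl splitLineStep (a, b, c, 2)).2.2.1) =
      (a, b, c ++ String.ofList ((split1 cs).getD 0 [])) := by
  induction cs with
  | nil =>
    intro a b c
    apply Prod.ext ?_ (Prod.ext ?_ ?_) <;> simp [split1] <;> apply String.ext <;> simp
  | cons ch cs ih =>
    intro a b c
    by_cases h : ch = ' '
    · rw [show (ch :: cs).foldl splitLineStep (a, b, c, 2) =
          cs.foldl splitLineStep (a, b, c, 3) by simp [splitLineStep, h]]
      rw [foldl_stage3 cs a b c 3 (by omega)]
      apply Prod.ext ?_ (Prod.ext ?_ ?_) <;> simp [split1, h] <;> apply String.ext <;> simp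
    · rw [show (ch :: cs).foldl splitLineStep (a, b, c, 2) =
          cs.foldl splitLineStep (a, b, c.push ch, 2) by simp [splitLineStep, h]]
      rw [ih a b (c.push ch)]
      obtain ⟨x, xs, hx⟩ : ∃ x xs, split1 cs = x :: xs := by
        cases hq : split1 cs with
        | nil => exact absurd hq (split1_ne_nil cs)
        | cons x xs => exact ⟨x, xs, rfl⟩
      apply Prod.ext ?_ (Prod.ext ?_ ?_) <;> simp [split1, h, hx] <;> apply String.ext <;> simp

theorem foldl_stage1 (cs : List Char) : ∀ (a b c : String),
    ((cs.foldl splitLineStep (a, b, c, 1)).1,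
     (cs.foldl splitLineStep (a, b, c, 1)).2.1,
     (cs.foldl splitLineStep (a, b, c, 1)).2.2.1) =
      (a, b ++ String.ofList ((split1 cs).getD 0 []),
       c ++ String.ofList ((split1 cs).getD 1 [])) := by
  induction cs with
  | nil =>
    intro a b c
    apply Prod.ext ?_ (Prod.ext ?_ ?_) <;> simp [split1] <;> apply String.ext <;> simp
  | cons ch cs ih =>
    intro a b c
    by_cases h : ch = ' '
    · rw [show (ch :: cs).foldl splitLineStep (a, b, c, 1) =
          cs.foldl splitLineStep (a, b, c, 2) by simp [splitLineStep, h]]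
      rw [foldl_stage2 cs a b c]
      apply Prod.ext ?_ (Prod.ext ?_ ?_) <;> simp [split1, h] <;> apply String.ext <;> simp
    · rw [show (ch :: cs).foldl splitLineStep (a, b, c, 1) =
          cs.foldl splitLineStep (a, b.push ch, c, 1) by simp [splitLineStep, h]]
      rw [ih a (b.push ch) c]
      obtain ⟨x, xs, hx⟩ : ∃ x xs, split1 cs = x :: xs := by
        cases hq : split1 cs with
        | nil => exact absurd hq (split1_ne_nil cs)
        | cons x xs => exact ⟨x, xs, rfl⟩
      apply Prod.ext ?_ (Prod.ext ?_ ?_) <;> simp [split1, h, hx] <;> apply String.ext <;> simp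

theorem foldl_stage0 (cs : List Char) : ∀ (a b c : String),
    ((cs.foldl splitLineStep (a, b, c, 0)).1,
     (cs.foldl splitLineStep (a, b, c, 0)).2.1,
     (cs.foldl splitLineStep (a, b, c, 0)).2.2.1) =
      (a ++ String.ofList ((split1 cs).getD 0 []),
       b ++ String.ofList ((split1 cs).getD 1 []),
       c ++ String.ofList ((split1 cs).getD 2 [])) := by
  induction cs with
  | nil =>
    intro a b c
    apply Prod.ext ?_ (Prod.ext ?_ ?_) <;> simp [split1] <;> apply String.ext <;> simp
  | cons ch cs ih =>
    intro a b c
    by_cases h : ch = ' '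
    · rw [show (ch :: cs).foldl splitLineStep (a, b, c, 0) =
          cs.foldl splitLineStep (a, b, c, 1) by simp [splitLineStep, h]]
      rw [foldl_stage1 cs a b c]
      apply Prod.ext ?_ (Prod.ext ?_ ?_) <;> simp [split1, h] <;> apply String.ext <;> simp
    · rw [show (ch :: cs).foldl splitLineStep (a, b, c, 0) =
          cs.foldl splitLineStep (a.push ch, b, c, 0) by simp [splitLineStep, h]]
      rw [ih (a.push ch) b c]
      obtain ⟨x, xs, hx⟩ : ∃ x xs, split1 cs = x :: xs := by
        cases hq : split1 cs with
        | nil => exact absurd hq (split1_ne_nil cs)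
        | cons x xs => exact ⟨x, xs, rfl⟩
      apply Prod.ext ?_ (Prod.ext ?_ ?_) <;> simp [split1, h, hx] <;> apply String.ext <;> simp

-- ===== VERDICT (by name: the statement is the Claim_ definition above) =====
theorem splitLine_spec : Claim_equal_splitLine := by
  unfold Claim_equal_splitLine
  intro line _
  simp only [Spec_splitLine, splitLine, splitLine_alt]
  rw [splitOn_eq_split1, foldl_stage0 line.toList "" "" ""]
  obtain ⟨x, xs, hx⟩ : ∃ x xs, split1 line.toList = x :: xs := by
    cases hq : split1 line.toList with
    | nil => exact absurd hq (split1_ne_nil line.toList)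
    | cons x xs => exact ⟨x, xs, rfl⟩
  simp [hx, List.getD]
  refine ⟨fun h => by subst h; simp, fun hlen => ?_⟩
  rcases xs with _ | ⟨y, _ | ⟨z, zs⟩⟩ <;> simp_all
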